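-- pv_equiv track=rewrite | github.com/ShawnShawnYou/FORM-Implement | phase_2.py | is_big_cycle
-- ===== SOURCE A (Python) =====
-- def is_big_cycle(preferences, rotation):
--     list_all_set = set()
--     list_2_set = set()
--     for i in rotation:
--         list_i = preferences[i]
--         for j in range(len(list_i)):
--             if j <= 1:
--                 list_2_set.add(list_i[j])
--             list_all_set.add(list_i[j])
--
--     if len(list_all_set - list_2_set) == 0:
--         return True
--     else:
--         return False
-- ===== SOURCE B (Python) =====
-- def is_big_cycle(preferences, rotation):
--     # Elements in the first two positions are covered by definition, so only the
--     # tail (positions >= 2) of each referenced list must be checked: each such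
--     # element must occur in the first two positions of some referenced list.
--     for i in rotation:
--         for x in preferences[i][2:]:
--             if not any(x in preferences[j][:2] for j in rotation):
--                 return False
--     return True
-- ===== Notes on version B (the rewrite author's own statement) =====
-- stated objective: alternative
-- what changed: B drops both sets and the set difference entirely: it observes that first-two-position elements are covered trivially, so it only scans the tail (positions >= 2) of each referenced list and checks each tail element by a direct nested scan over the first-two prefixes, returning False early.
import Mathlib
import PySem

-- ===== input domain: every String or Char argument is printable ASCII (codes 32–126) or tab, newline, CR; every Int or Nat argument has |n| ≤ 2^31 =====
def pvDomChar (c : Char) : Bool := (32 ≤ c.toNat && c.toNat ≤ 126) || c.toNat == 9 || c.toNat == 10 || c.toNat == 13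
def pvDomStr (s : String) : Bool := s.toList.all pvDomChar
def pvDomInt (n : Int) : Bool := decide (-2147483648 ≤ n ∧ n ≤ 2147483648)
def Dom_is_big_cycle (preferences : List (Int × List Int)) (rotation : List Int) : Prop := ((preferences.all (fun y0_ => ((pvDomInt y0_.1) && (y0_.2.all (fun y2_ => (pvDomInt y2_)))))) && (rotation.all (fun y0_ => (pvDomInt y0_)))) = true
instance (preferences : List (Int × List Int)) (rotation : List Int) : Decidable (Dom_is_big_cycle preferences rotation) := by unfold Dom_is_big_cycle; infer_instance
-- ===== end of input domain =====

-- B drops A's two sets and the set difference: only the tail (positions >= 2) of each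
-- referenced list needs checking, each tail element by a direct nested scan; objective: alternative.

-- dict access preferences[i] (first-match lookup; total form, used only under Pre_)
def pvLi (preferences : List (Int × List Int)) (i : Int) : List Int :=
  (preferences.lookup i).getD []

-- ===== PORT A =====
-- one step of A's inner loop, on (list_all_set, list_2_set) and (j, list_i[j])
def pvStepA (st : PySem.Set Int × PySem.Set Int) (jx : Int × Int) : PySem.Set Int × PySem.Set Int :=
  let st2 := if jx.1 ≤ 1 then (st.1, PySem.Set.add st.2 jx.2) else st
  (PySem.Set.add st2.1 jx.2, st2.2)

def is_big_cycle (preferences : List (Int × List Int)) (rotation : List Int) : Bool :=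
  let st := rotation.foldl
    (fun st i => (PySem.List.enumerate (pvLi preferences i) 0).foldl pvStepA st)
    (PySem.Set.empty, PySem.Set.empty)
  if PySem.Set.len (PySem.Set.diff st.1 st.2) = 0 then true else false

-- ===== PORT B =====
def is_big_cycle_alt (preferences : List (Int × List Int)) (rotation : List Int) : Bool :=
  rotation.all (fun i =>
    (PySem.List.slice (pvLi preferences i) (some 2) none).all (fun x =>
      rotation.any (fun j =>
        (PySem.List.slice (pvLi preferences j) none (some 2)).contains x)))

-- ===== PRECONDITION & SPEC =====
-- Pre_ excludes exactly the inputs on which Python A raises KeyError: rotation mentioning an i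
-- that is not a key of preferences.
def Pre_is_big_cycle (preferences : List (Int × List Int)) (rotation : List Int) : Prop :=
  ∀ i ∈ rotation, (preferences.lookup i).isSome = true
instance (preferences : List (Int × List Int)) (rotation : List Int) : Decidable (Pre_is_big_cycle preferences rotation) := by unfold Pre_is_big_cycle; infer_instance

def pvWitness_is_big_cycle : (List (Int × List Int)) × List Int :=
  ([(0, [1, 2, 3]), (1, [2, 1]), (2, [3])], [0, 1, 2])

def Spec_is_big_cycle (preferences : List (Int × List Int)) (rotation : List Int) (out : Bool) : Prop := out = is_big_cycle_alt preferences rotation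
instance (preferences : List (Int × List Int)) (rotation : List Int) (out : Bool) : Decidable (Spec_is_big_cycle preferences rotation out) := by unfold Spec_is_big_cycle; infer_instance

-- ===== CLAIM (what is proved, stated in full; the proofs are below) =====
def Claim_equal_is_big_cycle : Prop := ∀ (preferences : List (Int × List Int)) (rotation : List Int), Dom_is_big_cycle preferences rotation → Pre_is_big_cycle preferences rotation → Spec_is_big_cycle preferences rotation (is_big_cycle preferences rotation)

-- ===== LEMMAS AND PROOFS =====

-- the state A's outer loop has built (proof-side abbreviation; definitionally A's let-bound st)
def pvOuterA (preferences : List (Int × List Int)) (rotation : List Int) :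
    PySem.Set Int × PySem.Set Int :=
  rotation.foldl
    (fun st i => (PySem.List.enumerate (pvLi preferences i) 0).foldl pvStepA st)
    (PySem.Set.empty, PySem.Set.empty)

theorem pv_witness_ok :
    Dom_is_big_cycle pvWitness_is_big_cycle.1 pvWitness_is_big_cycle.2 ∧
    Pre_is_big_cycle pvWitness_is_big_cycle.1 pvWitness_is_big_cycle.2 := by
  constructor
  · decide
  · unfold Pre_is_big_cycle pvWitness_is_big_cycle; decide

-- A's inner loop past index 1 only feeds list_all_set
theorem pv_innerA_tail (xs : List Int) (s : Int) (hs : 2 ≤ s)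
    (st : PySem.Set Int × PySem.Set Int) :
    (PySem.List.enumerate xs s).foldl pvStepA st = (PySem.Set.update st.1 xs, st.2) := by
  induction xs generalizing s st with
  | nil => simp [PySem.List.enumerate_nil, PySem.Set.update]
  | cons a t ih =>
    rw [PySem.List.enumerate_cons, List.foldl_cons]
    have hstep : pvStepA st (s, a) = (PySem.Set.add st.1 a, st.2) := by
      simp [pvStepA, show ¬ s ≤ 1 by omega]
    rw [hstep, ih (s + 1) (by omega)]
    rfl

-- membership after A's full inner loop over one preference list
theorem pv_innerA_mem (xs : List Int) (st : PySem.Set Int × PySem.Set Int) (x : Int) :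
    (x ∈ ((PySem.List.enumerate xs 0).foldl pvStepA st).1 ↔ x ∈ st.1 ∨ x ∈ xs) ∧
    (x ∈ ((PySem.List.enumerate xs 0).foldl pvStepA st).2 ↔ x ∈ st.2 ∨ x ∈ xs.take 2) := by
  match xs with
  | [] => simp [PySem.List.enumerate_nil]
  | [a] =>
    rw [PySem.List.enumerate_cons, PySem.List.enumerate_nil]
    simp only [List.foldl_cons, List.foldl_nil]
    have h1 : pvStepA st (0, a) = (PySem.Set.add st.1 a, PySem.Set.add st.2 a) := by
      simp [pvStepA]
    rw [h1]
    simp [PySem.Set.mem_add]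
  | a :: b :: t =>
    rw [PySem.List.enumerate_cons, PySem.List.enumerate_cons, List.foldl_cons, List.foldl_cons]
    have h1 : pvStepA st (0, a) = (PySem.Set.add st.1 a, PySem.Set.add st.2 a) := by
      simp [pvStepA]
    have h2 : pvStepA (PySem.Set.add st.1 a, PySem.Set.add st.2 a) ((0 : Int) + 1, b) =
        (PySem.Set.add (PySem.Set.add st.1 a) b, PySem.Set.add (PySem.Set.add st.2 a) b) := by
      simp [pvStepA]
    rw [h1, h2, pv_innerA_tail t (0 + 1 + 1) (by omega)]
    simp [PySem.Set.mem_update, PySem.Set.mem_add]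
    constructor <;> tauto

-- membership after A's outer loop
theorem pv_outerA_mem_gen (preferences : List (Int × List Int)) (x : Int) :
    ∀ (rot : List Int) (st : PySem.Set Int × PySem.Set Int),
      (x ∈ (rot.foldl
          (fun st i => (PySem.List.enumerate (pvLi preferences i) 0).foldl pvStepA st) st).1 ↔
        x ∈ st.1 ∨ ∃ i ∈ rot, x ∈ pvLi preferences i) ∧
      (x ∈ (rot.foldl
          (fun st i => (PySem.List.enumerate (pvLi preferences i) 0).foldl pvStepA st) st).2 ↔
        x ∈ st.2 ∨ ∃ i ∈ rot, x ∈ (pvLi preferences i).take 2) := by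
  intro rot
  induction rot with
  | nil => simp
  | cons i0 r ih =>
    intro st
    rw [List.foldl_cons]
    have hi := ih ((PySem.List.enumerate (pvLi preferences i0) 0).foldl pvStepA st)
    have hm := pv_innerA_mem (pvLi preferences i0) st x
    simp only [List.exists_mem_cons_iff]
    constructor
    · rw [hi.1, hm.1]; exact or_assoc
    · rw [hi.2, hm.2]; exact or_assoc

theorem pv_outerA_mem (preferences : List (Int × List Int)) (rotation : List Int) (x : Int) :
    (x ∈ (pvOuterA preferences rotation).1 ↔ ∃ i ∈ rotation, x ∈ pvLi preferences i) ∧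
    (x ∈ (pvOuterA preferences rotation).2 ↔ ∃ i ∈ rotation, x ∈ (pvLi preferences i).take 2) := by
  have h := pv_outerA_mem_gen preferences x rotation (PySem.Set.empty, PySem.Set.empty)
  unfold pvOuterA
  refine ⟨?_, ?_⟩
  · rw [h.1]; simp [PySem.Set.empty]
  · rw [h.2]; simp [PySem.Set.empty]

theorem pv_set_len_zero (s : PySem.Set Int) : PySem.Set.len s = 0 ↔ s = [] := by
  simp [PySem.Set.len]

theorem pv_A_true_iff (preferences : List (Int × List Int)) (rotation : List Int) :
    is_big_cycle preferences rotation = true ↔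
      ∀ x ∈ (pvOuterA preferences rotation).1, x ∈ (pvOuterA preferences rotation).2 := by
  show (if PySem.Set.len (PySem.Set.diff (pvOuterA preferences rotation).1
        (pvOuterA preferences rotation).2) = 0 then true else false) = true ↔ _
  by_cases h0 : PySem.Set.len (PySem.Set.diff (pvOuterA preferences rotation).1
      (pvOuterA preferences rotation).2) = 0
  · rw [if_pos h0]
    simp only [true_iff]
    have hnil := (pv_set_len_zero _).mp h0
    intro x hx
    by_contra hc
    have hmem : x ∈ PySem.Set.diff (pvOuterA preferences rotation).1
        (pvOuterA preferences rotation).2 := (PySem.Set.mem_diff _ _ _).mpr ⟨hx, hc⟩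
    rw [hnil] at hmem
    simp at hmem
  · rw [if_neg h0]
    simp only [Bool.false_eq_true, false_iff]
    intro hP
    apply h0
    rw [pv_set_len_zero, List.eq_nil_iff_forall_not_mem]
    intro a ha
    rcases (PySem.Set.mem_diff _ _ _).mp ha with ⟨h1, h2⟩
    exact h2 (hP a h1)

theorem pv_slice_take (xs : List Int) :
    PySem.List.slice xs none (some 2) = xs.take 2 := by
  simp [pysem]

theorem pv_slice_drop (xs : List Int) :
    PySem.List.slice xs (some 2) none = xs.drop 2 := by
  simp [pysem]

theorem pv_B_true_iff (preferences : List (Int × List Int)) (rotation : List Int) :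
    is_big_cycle_alt preferences rotation = true ↔
      ∀ i ∈ rotation, ∀ x ∈ (pvLi preferences i).drop 2,
        ∃ j ∈ rotation, x ∈ (pvLi preferences j).take 2 := by
  unfold is_big_cycle_alt
  simp [pv_slice_take, pv_slice_drop, List.all_eq_true, List.any_eq_true]

-- splitting a list at position 2
theorem pv_mem_split (xs : List Int) (x : Int) :
    x ∈ xs ↔ x ∈ xs.take 2 ∨ x ∈ xs.drop 2 := by
  constructor
  · intro hx
    rw [← List.take_append_drop 2 xs] at hx
    exact List.mem_append.mp hx
  · intro hx
    rcases hx with h | h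
    · exact List.mem_of_mem_take h
    · exact List.mem_of_mem_drop h

-- ===== VERDICT (by name: the statement is the Claim_ definition above) =====
theorem is_big_cycle_spec : Claim_equal_is_big_cycle := by
  intro preferences rotation _ _
  unfold Spec_is_big_cycle
  rw [Bool.eq_iff_iff, pv_A_true_iff, pv_B_true_iff]
  have hm := fun x => pv_outerA_mem preferences rotation x
  constructor
  · intro h i hi x hx
    have hall : x ∈ (pvOuterA preferences rotation).1 :=
      (hm x).1.mpr ⟨i, hi, (pv_mem_split _ x).mpr (Or.inr hx)⟩
    exact (hm x).2.mp (h x hall)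
  · intro h x hx
    rcases (hm x).1.mp hx with ⟨i, hi, hxi⟩
    rcases (pv_mem_split _ x).mp hxi with htk | hdr
    · exact (hm x).2.mpr ⟨i, hi, htk⟩
    · exact (hm x).2.mpr (h i hi x hdr)
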